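-- pv_equiv track=rewrite | github.com/appMerit/better-cov | app/services/ast_analyzer/formatter.py | _mermaid_label
-- ===== SOURCE A (Python) =====
-- def _mermaid_label(text: str) -> str:
--     """Escape a label for Mermaid node labels.
--
--     Strips characters that break Mermaid parsing inside node shapes.
--     """
--     text = text.replace('"', "")
--     text = text.replace("'", "")
--     text = text.replace("(", " ")
--     text = text.replace(")", " ")
--     text = text.replace("{", "")
--     text = text.replace("}", "")
--     # Collapse multiple spaces
--     while "  " in text:
--         text = text.replace("  ", " ")
--     return text.strip()
-- ===== SOURCE B (Python) =====
-- def _mermaid_label(text: str) -> str: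
--     """Escape a label for Mermaid node labels (single-pass scan)."""
--     out = []
--     last_space = False
--     for c in text:
--         if c in '"\'{}':
--             continue  # dropped chars do not reset the space flag
--         if c in '() ':
--             if not last_space:
--                 out.append(' ')
--                 last_space = True
--         else:
--             out.append(c)
--             last_space = False
--     return ''.join(out).strip()
-- ===== Notes on version B (the rewrite author's own statement) =====
-- stated objective: simpler
-- what changed: A does six full-string replace passes plus a repeated replace loop to collapse double spaces; B builds the result in one left-to-right scan with a last-appended-was-space flag and strips once.
import Mathlib
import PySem

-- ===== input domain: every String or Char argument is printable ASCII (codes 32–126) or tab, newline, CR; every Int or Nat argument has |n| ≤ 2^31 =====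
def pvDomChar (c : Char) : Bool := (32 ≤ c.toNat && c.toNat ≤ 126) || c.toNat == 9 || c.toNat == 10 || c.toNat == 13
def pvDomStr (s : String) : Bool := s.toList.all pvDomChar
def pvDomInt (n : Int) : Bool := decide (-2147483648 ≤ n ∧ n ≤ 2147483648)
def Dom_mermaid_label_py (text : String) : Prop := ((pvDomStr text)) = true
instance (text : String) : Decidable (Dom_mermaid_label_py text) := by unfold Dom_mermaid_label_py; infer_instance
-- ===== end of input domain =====

-- B replaces A's six full-string replace passes plus a repeated collapse loop by one
-- left-to-right scan with a last-was-space flag (objective: simpler single pass).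

-- ===== PORT A =====
-- pvPairRep/pvGo_pair/pvPairRep_length_lt/pvReplace_len_lt: characterisation of one
-- replace("  ", " ") pass, needed by the termination proof of A's while loop.
def pvPairRep : List Char → List Char
  | [] => []
  | [c] => [c]
  | c :: d :: t => if c = ' ' ∧ d = ' ' then ' ' :: pvPairRep t else c :: pvPairRep (d :: t)

theorem pvGo_pair (fuel : Nat) (l acc : List Char) (h : l.length ≤ fuel) :
    PySem.Chars.replace.go [' ', ' '] [' '] fuel l acc = acc.reverse ++ pvPairRep l := by
  induction fuel generalizing l acc with
  | zero =>
    have : l = [] := by cases l <;> simp_all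
    subst this
    rw [PySem.Chars.replace.go.eq_def]; simp [pvPairRep]
  | succ n ih =>
    match l with
    | [] => rw [PySem.Chars.replace.go.eq_def]; simp [pvPairRep]
    | [c] =>
      have hrec := ih [] (c :: acc) (by simp)
      rw [PySem.Chars.replace.go.eq_def]
      simp [List.isPrefixOf, hrec, pvPairRep]
    | c :: d :: t =>
      by_cases hsp : c = ' ' ∧ d = ' '
      · obtain ⟨rfl, rfl⟩ := hsp
        have hrec := ih t (' ' :: acc) (by simp at h; omega)
        rw [PySem.Chars.replace.go.eq_def]
        simp [List.isPrefixOf, hrec, pvPairRep]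
      · have hif : ([' ', ' '] : List Char).isPrefixOf (c :: d :: t) = false := by
          simp [List.isPrefixOf]
          intro h1 h2
          exact absurd ⟨h1.symm, h2.symm⟩ hsp
        have hrec := ih (d :: t) (c :: acc) (by simp at h ⊢; omega)
        have hpr : pvPairRep (c :: d :: t) = c :: pvPairRep (d :: t) := by
          rw [pvPairRep.eq_def]; simp [hsp]
        rw [PySem.Chars.replace.go.eq_def]
        simp [hif, hrec, hpr]

theorem pvReplace_pair (l : List Char) :
    PySem.Chars.replace l [' ', ' '] [' '] = pvPairRep l := by
  show (if ([' ', ' '] : List Char).isEmpty = true then _ else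
      PySem.Chars.replace.go [' ', ' '] [' '] l.length l []) = _
  simp [pvGo_pair l.length l [] (le_refl _)]

theorem pvPairRep_length_le (l : List Char) : (pvPairRep l).length ≤ l.length := by
  induction l using pvPairRep.induct with
  | case1 => simp [pvPairRep]
  | case2 c => simp [pvPairRep]
  | case3 c d t hsp ih =>
    rw [pvPairRep, if_pos hsp]; simp; omega
  | case4 c d t hsp ih =>
    rw [pvPairRep, if_neg hsp]; simp at ih ⊢; omega

theorem pvPairRep_length_lt (l : List Char) :
    [' ', ' '] <:+: l → (pvPairRep l).length < l.length := by
  induction l using pvPairRep.induct with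
  | case1 => intro h; have := h.length_le; simp at this
  | case2 c => intro h; have := h.length_le; simp at this
  | case3 c d t hsp ih =>
    intro _
    rw [pvPairRep, if_pos hsp]
    have := pvPairRep_length_le t
    simp; omega
  | case4 c d t hsp ih =>
    intro h
    rw [pvPairRep, if_neg hsp]
    have h' : [' ', ' '] <:+: d :: t := by
      rcases List.infix_cons_iff.mp h with hp | hi
      · rcases List.cons_prefix_cons.mp hp with ⟨hc, hp'⟩
        rcases List.cons_prefix_cons.mp hp' with ⟨hd, _⟩
        exact absurd ⟨hc.symm, hd.symm⟩ hsp
      · exact hi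
    have := ih h'
    simp at this ⊢; omega

theorem pvReplace_len_lt (t : String) (h : PySem.Str.isIn "  " t = true) :
    (PySem.Str.replace t "  " " ").toList.length < t.toList.length := by
  rw [PySem.Str.toList_replace,
      show ("  " : String).toList = [' ', ' '] by decide,
      show (" " : String).toList = [' '] by decide, pvReplace_pair]
  exact pvPairRep_length_lt t.toList (by simpa using (PySem.Str.isIn_iff_infix "  " t).mp h)

def mermaid_label_py_collapse (t : String) : String :=
  if PySem.Str.isIn "  " t then
    mermaid_label_py_collapse (PySem.Str.replace t "  " " ")
  else t
termination_by t.toList.length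
decreasing_by exact pvReplace_len_lt t (by assumption)

def mermaid_label_py (text : String) : String :=
  let t1 := PySem.Str.replace text "\"" ""
  let t2 := PySem.Str.replace t1 "'" ""
  let t3 := PySem.Str.replace t2 "(" " "
  let t4 := PySem.Str.replace t3 ")" " "
  let t5 := PySem.Str.replace t4 "{" ""
  let t6 := PySem.Str.replace t5 "}" ""
  PySem.Str.strip (mermaid_label_py_collapse t6)

-- ===== PORT B =====
def mermaid_label_py_alt (text : String) : String :=
  let r := text.toList.foldl (fun (s : List Char × Bool) c =>
    if c = '"' ∨ c = '\'' ∨ c = '{' ∨ c = '}' then s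
    else if c = '(' ∨ c = ')' ∨ c = ' ' then
      (if s.2 then s else (s.1 ++ [' '], true))
    else (s.1 ++ [c], false)) ([], false)
  PySem.Str.strip (String.ofList r.1)

-- ===== PRECONDITION & SPEC =====
def Spec_mermaid_label_py (text : String) (out : String) : Prop := out = mermaid_label_py_alt text
instance (text : String) (out : String) : Decidable (Spec_mermaid_label_py text out) := by unfold Spec_mermaid_label_py; infer_instance

-- ===== CLAIM (what is proved, stated in full; the proofs are below) =====
def Claim_equal_mermaid_label_py : Prop := ∀ (text : String), Dom_mermaid_label_py text → Spec_mermaid_label_py text (mermaid_label_py text)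

-- ===== LEMMAS AND PROOFS =====

-- per-character classification (what B's scan does with one char)
def pvF (c : Char) : Option Char :=
  if c = '"' ∨ c = '\'' ∨ c = '{' ∨ c = '}' then none
  else if c = '(' ∨ c = ')' then some ' ' else some c

-- squeeze runs of spaces (flag = last emitted char was a space)
def pvSqueeze : Bool → List Char → List Char
  | _, [] => []
  | b, c :: t =>
    if c = ' ' then (if b then pvSqueeze true t else ' ' :: pvSqueeze true t)
    else c :: pvSqueeze false t

def pvFlag : Bool → List Char → Bool
  | b, [] => b
  | _, c :: t => pvFlag (c = ' ') t

theorem pvGo_one (o : Char) (new : List Char) (fuel : Nat) (l acc : List Char)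
    (h : l.length ≤ fuel) :
    PySem.Chars.replace.go [o] new fuel l acc =
      acc.reverse ++ l.flatMap (fun c => if c = o then new else [c]) := by
  induction fuel generalizing l acc with
  | zero =>
    have : l = [] := by cases l <;> simp_all
    subst this
    rw [PySem.Chars.replace.go.eq_def]; simp
  | succ n ih =>
    match l with
    | [] => rw [PySem.Chars.replace.go.eq_def]; simp
    | c :: t =>
      by_cases hc : c = o
      · subst hc
        have hrec := ih t (new.reverse ++ acc) (by simp at h; omega)
        rw [PySem.Chars.replace.go.eq_def]
        simp [List.isPrefixOf, hrec]
      · have hrec := ih t (c :: acc) (by simp at h; omega)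
        rw [PySem.Chars.replace.go.eq_def]
        simp [List.isPrefixOf, Ne.symm hc, hrec, hc]

theorem pvReplace_one (l : List Char) (o : Char) (new : List Char) :
    PySem.Chars.replace l [o] new = l.flatMap (fun c => if c = o then new else [c]) := by
  show (if ([o] : List Char).isEmpty = true then _ else
      PySem.Chars.replace.go [o] new l.length l []) = _
  simp [pvGo_one o new l.length l [] (le_refl _)]

-- the six replace passes of A compose to one filterMap by pvF
theorem pvSixReplace (l : List Char) :
    ((((((l.flatMap (fun c => if c = '"' then [] else [c])).flatMap
        (fun c => if c = '\'' then [] else [c])).flatMap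
        (fun c => if c = '(' then [' '] else [c])).flatMap
        (fun c => if c = ')' then [' '] else [c])).flatMap
        (fun c => if c = '{' then [] else [c])).flatMap
        (fun c => if c = '}' then [] else [c])) = l.filterMap pvF := by
  induction l with
  | nil => simp
  | cons c t ih =>
    simp only [List.flatMap_cons, List.flatMap_append, List.filterMap_cons]
    by_cases h1 : c = '"' <;> by_cases h2 : c = '\'' <;> by_cases h3 : c = '(' <;>
      by_cases h4 : c = ')' <;> by_cases h5 : c = '{' <;> by_cases h6 : c = '}' <;>
      simp_all [pvF]

theorem pvSqueeze_pairRep (b : Bool) (l : List Char) :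
    pvSqueeze b (pvPairRep l) = pvSqueeze b l := by
  induction l using pvPairRep.induct generalizing b with
  | case1 => rfl
  | case2 c => rfl
  | case3 c d t hsp ih =>
    obtain ⟨rfl, rfl⟩ := hsp
    rw [pvPairRep, if_pos ⟨rfl, rfl⟩]
    cases b <;> simp [pvSqueeze, ih]
  | case4 c d t hsp ih =>
    rw [pvPairRep, if_neg hsp]
    by_cases hc : c = ' '
    · subst hc
      have hd : d ≠ ' ' := fun hd => hsp ⟨rfl, hd⟩
      cases b <;> simp [pvSqueeze, ih]
    · simp [pvSqueeze, hc, ih]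

theorem pvSqueeze_of_no_pair (l : List Char) (h : ¬ ([' ', ' '] <:+: l)) :
    pvSqueeze false l = l ∧ (l.head? ≠ some ' ' → pvSqueeze true l = l) := by
  induction l with
  | nil => simp [pvSqueeze]
  | cons c t ih =>
    have hnp : ¬ ([' ', ' '] <+: c :: t) := fun hp => h (List.infix_cons_iff.mpr (Or.inl hp))
    have ht : ¬ ([' ', ' '] <:+: t) := fun hi => h (List.infix_cons_iff.mpr (Or.inr hi))
    rcases ih ht with ⟨ih1, ih2⟩
    by_cases hc : c = ' '
    · subst hc
      have hth : t.head? ≠ some ' ' := by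
        intro hh
        cases t with
        | nil => simp at hh
        | cons d t' =>
          simp at hh
          exact hnp (by rw [hh]; exact ⟨t', rfl⟩)
      constructor
      · simp [pvSqueeze, ih2 hth]
      · intro hh; simp at hh
    · constructor
      · simp [pvSqueeze, hc, ih1]
      · intro _; simp [pvSqueeze, hc, ih1]

theorem pvCollapse_eq (t : String) :
    mermaid_label_py_collapse t = String.ofList (pvSqueeze false t.toList) := by
  induction t using mermaid_label_py_collapse.induct with
  | case1 t h ih =>
    rw [mermaid_label_py_collapse, if_pos (by simpa using h), ih]
    congr 1
    rw [PySem.Str.toList_replace,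
        show ("  " : String).toList = [' ', ' '] by decide,
        show (" " : String).toList = [' '] by decide,
        pvReplace_pair, pvSqueeze_pairRep]
  | case2 t h =>
    rw [mermaid_label_py_collapse, if_neg (by simpa using h)]
    have hni : ¬ ([' ', ' '] <:+: t.toList) := by
      intro hi
      have := (PySem.Str.isIn_iff_infix "  " t).mpr (by simpa using hi)
      simp_all
    rw [(pvSqueeze_of_no_pair t.toList hni).1, String.ofList_toList]

theorem pvFold_step (l : List Char) (acc : List Char) (b : Bool) :
    l.foldl (fun (s : List Char × Bool) c =>
      if c = '"' ∨ c = '\'' ∨ c = '{' ∨ c = '}' then s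
      else if c = '(' ∨ c = ')' ∨ c = ' ' then
        (if s.2 then s else (s.1 ++ [' '], true))
      else (s.1 ++ [c], false)) (acc, b)
    = (acc ++ pvSqueeze b (l.filterMap pvF), pvFlag b (l.filterMap pvF)) := by
  induction l generalizing acc b with
  | nil => simp [pvSqueeze, pvFlag]
  | cons c t ih =>
    simp only [List.foldl_cons, List.filterMap_cons]
    by_cases h1 : c = '"' ∨ c = '\'' ∨ c = '{' ∨ c = '}'
    · rw [if_pos h1, show pvF c = none by simp [pvF, h1], ih]
    · rw [if_neg h1]
      by_cases h2 : c = '(' ∨ c = ')' ∨ c = ' '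
      · have hf : pvF c = some ' ' := by
          rcases h2 with h | h | h <;> subst h <;> simp [pvF]
        rw [if_pos h2, hf]
        cases b with
        | true => rw [if_pos rfl]; simp [ih, pvSqueeze, pvFlag]
        | false => rw [if_neg (by simp)]; simp [ih, pvSqueeze, pvFlag]
      · have hc : c ≠ ' ' := fun hh => h2 (Or.inr (Or.inr hh))
        have h3 : ¬ (c = '(' ∨ c = ')') := fun hh => hh.elim (fun a => h2 (Or.inl a)) (fun a => h2 (Or.inr (Or.inl a)))
        have hf : pvF c = some c := by simp [pvF, h1, h3]
        rw [if_neg h2, hf, ih]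
        simp [pvSqueeze, pvFlag, hc]

theorem pvA_chain (text : String) :
    mermaid_label_py text =
      PySem.Str.strip (String.ofList (pvSqueeze false (text.toList.filterMap pvF))) := by
  unfold mermaid_label_py
  show PySem.Str.strip (mermaid_label_py_collapse
      (PySem.Str.replace (PySem.Str.replace (PySem.Str.replace (PySem.Str.replace
        (PySem.Str.replace (PySem.Str.replace text "\"" "") "'" "") "(" " ")
        ")" " ") "{" "") "}" "")) = _
  have hlist : (PySem.Str.replace (PySem.Str.replace (PySem.Str.replace (PySem.Str.replace
        (PySem.Str.replace (PySem.Str.replace text "\"" "") "'" "") "(" " ")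
        ")" " ") "{" "") "}" "").toList = text.toList.filterMap pvF := by
    rw [PySem.Str.toList_replace, PySem.Str.toList_replace, PySem.Str.toList_replace,
        PySem.Str.toList_replace, PySem.Str.toList_replace, PySem.Str.toList_replace]
    rw [show ("\"" : String).toList = ['"'] by decide,
        show ("'" : String).toList = ['\''] by decide,
        show ("(" : String).toList = ['('] by decide,
        show (")" : String).toList = [')'] by decide,
        show ("{" : String).toList = ['{'] by decide,
        show ("}" : String).toList = ['}'] by decide,
        show ("" : String).toList = [] by decide,
        show (" " : String).toList = [' '] by decide]
    rw [pvReplace_one, pvReplace_one, pvReplace_one, pvReplace_one, pvReplace_one,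
        pvReplace_one]
    exact pvSixReplace text.toList
  rw [pvCollapse_eq, hlist]

-- ===== VERDICT (by name: the statement is the Claim_ definition above) =====
theorem mermaid_label_py_spec : Claim_equal_mermaid_label_py := by
  intro text _
  show mermaid_label_py text = mermaid_label_py_alt text
  rw [pvA_chain]
  show _ = PySem.Str.strip (String.ofList
    (text.toList.foldl _ ([], false)).1)
  rw [pvFold_step]
  simp
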